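-- pv_equiv track=rewrite | github.com/enesemretas/hingeprot-colab-ui | hingeprot/processHinges.py | build_segments_from_hinges
-- ===== SOURCE A (Python) =====
-- from typing import Dict, List, Tuple, Optional
--
-- def build_segments_from_hinges(N: int, hinges_pos: List[int]) -> List[Tuple[int, int]]:
--     """
--     hinge_pos: 0-based indices, each hinge is END of left segment.
--     segments: [0..h1], [h1+1..h2], ..., [last+1..N-1]
--     """
--     if N <= 0:
--         return []
--     pos = sorted(set([p for p in hinges_pos if 0 <= p < N]))
--     segs: List[Tuple[int, int]] = []
--     start = 0
--     for p in pos: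
--         if start <= p:
--             segs.append((start, p))
--         start = p + 1
--     if start <= N - 1:
--         segs.append((start, N - 1))
--     if not segs:
--         segs = [(0, N - 1)]
--     return segs
-- ===== SOURCE B (Python) =====
-- def build_segments_from_hinges(N, hinges_pos):
--     # Interval-splitting: start from the whole segment and split at each valid
--     # hinge in input order (no sorting, no set).
--     if N <= 0:
--         return []
--     segs = [(0, N - 1)]
--     for p in hinges_pos:
--         if 0 <= p < N:
--             out = []
--             for (s, e) in segs:
--                 if s <= p and p < e:
--                     out.append((s, p))
--                     out.append((p + 1, e))
--                 else:
--                     out.append((s, e))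
--             segs = out
--     return segs
-- ===== Notes on version B (the rewrite author's own statement) =====
-- stated objective: alternative
-- what changed: B abandons A's sort-dedupe-then-sweep: it starts from the whole interval [(0,N-1)] and repeatedly splits the segment containing each valid hinge in input order, so no sorting, no set and no running cursor are used.
import Mathlib
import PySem

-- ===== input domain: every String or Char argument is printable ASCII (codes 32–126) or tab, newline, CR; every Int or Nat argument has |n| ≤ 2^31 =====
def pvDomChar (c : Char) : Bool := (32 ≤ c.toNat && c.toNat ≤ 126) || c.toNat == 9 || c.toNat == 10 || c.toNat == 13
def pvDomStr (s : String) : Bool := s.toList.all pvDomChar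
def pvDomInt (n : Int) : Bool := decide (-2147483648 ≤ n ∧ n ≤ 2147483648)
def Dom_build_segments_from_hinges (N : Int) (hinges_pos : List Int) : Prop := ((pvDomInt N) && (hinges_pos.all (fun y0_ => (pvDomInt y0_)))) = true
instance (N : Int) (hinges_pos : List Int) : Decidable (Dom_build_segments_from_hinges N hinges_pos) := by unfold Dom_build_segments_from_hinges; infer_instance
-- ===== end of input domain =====

-- B replaces A's sort-dedupe-and-sweep by interval splitting: start from [(0,N-1)] and split the
-- segment containing each valid hinge, in input order; objective: alternative algorithm, same result.

-- ===== PORT A =====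
def build_segments_from_hinges (N : Int) (hinges_pos : List Int) : List (Int × Int) :=
  if N ≤ 0 then []
  else
    let pos := PySem.List.sorted (PySem.Set.ofList (hinges_pos.filter (fun p => decide (0 ≤ p) && decide (p < N)))) (fun x => x) false
    let st := pos.foldl (fun (acc : List (Int × Int) × Int) p =>
        (if acc.2 ≤ p then acc.1 ++ [(acc.2, p)] else acc.1, p + 1)) ([], 0)
    let segs := if st.2 ≤ N - 1 then st.1 ++ [(st.2, N - 1)] else st.1
    if segs = [] then [(0, N - 1)] else segs

-- ===== PORT B =====
def build_segments_from_hinges_alt (N : Int) (hinges_pos : List Int) : List (Int × Int) :=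
  if N ≤ 0 then []
  else hinges_pos.foldl (fun segs p =>
      if 0 ≤ p ∧ p < N then
        segs.foldl (fun out se =>
          out ++ (if se.1 ≤ p ∧ p < se.2 then [(se.1, p), (p + 1, se.2)] else [se])) []
      else segs) [(0, N - 1)]

-- ===== PRECONDITION & SPEC =====
def Spec_build_segments_from_hinges (N : Int) (hinges_pos : List Int) (out : List (Int × Int)) : Prop := out = build_segments_from_hinges_alt N hinges_pos
instance (N : Int) (hinges_pos : List Int) (out : List (Int × Int)) : Decidable (Spec_build_segments_from_hinges N hinges_pos out) := by unfold Spec_build_segments_from_hinges; infer_instance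

-- ===== CLAIM (what is proved, stated in full; the proofs are below) =====
def Claim_equal_build_segments_from_hinges : Prop := ∀ (N : Int) (hinges_pos : List Int), Dom_build_segments_from_hinges N hinges_pos → Spec_build_segments_from_hinges N hinges_pos (build_segments_from_hinges N hinges_pos)

-- ===== LEMMAS AND PROOFS =====

-- canonical segmentation of [start..N-1] cut after each element of the (sorted) cut list
def pvSegsFrom (N : Int) : Int → List Int → List (Int × Int)
  | start, [] => [(start, N - 1)]
  | start, c :: cs => (start, c) :: pvSegsFrom N (c + 1) cs

-- one splitting pass of B, in flatMap form
def pvSplit (p : Int) (segs : List (Int × Int)) : List (Int × Int) :=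
  segs.flatMap (fun se => if se.1 ≤ p ∧ p < se.2 then [(se.1, p), (p + 1, se.2)] else [se])

-- sorted insertion and the cut list B's fold accumulates
def pvIns (p : Int) : List Int → List Int
  | [] => [p]
  | c :: cs => if p ≤ c then p :: c :: cs else c :: pvIns p cs

def pvInsAll (N : Int) (C : List Int) (hs : List Int) : List Int :=
  hs.foldl (fun C p => if 0 ≤ p ∧ p ≤ N - 2 ∧ p ∉ C then pvIns p C else C) C

theorem pvSegsFrom_ne_nil (N start : Int) (C : List Int) : pvSegsFrom N start C ≠ [] := by
  cases C <;> simp [pvSegsFrom]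

theorem mem_pvIns (p x : Int) : ∀ C, x ∈ pvIns p C ↔ x = p ∨ x ∈ C := by
  intro C
  induction C with
  | nil => simp [pvIns]
  | cons c cs ih =>
      by_cases h : p ≤ c
      · simp [pvIns, h]
      · simp [pvIns, h, ih]
        tauto

theorem pairwise_pvIns (p : Int) : ∀ C, C.Pairwise (· < ·) → p ∉ C → (pvIns p C).Pairwise (· < ·) := by
  intro C
  induction C with
  | nil => intro _ _; simp [pvIns]
  | cons c cs ih =>
      intro hpw hnm
      rcases List.pairwise_cons.mp hpw with ⟨hc, hcs⟩
      by_cases h : p ≤ c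
      · have hpc : p < c := lt_of_le_of_ne h (by simp at hnm; tauto)
        rw [show pvIns p (c :: cs) = p :: c :: cs by simp [pvIns, h]]
        refine List.pairwise_cons.mpr ⟨?_, hpw⟩
        intro q hq
        rcases List.mem_cons.mp hq with rfl | hq
        · exact hpc
        · exact lt_trans hpc (hc q hq)
      · have hcp : c < p := by omega
        rw [show pvIns p (c :: cs) = c :: pvIns p cs by simp [pvIns, h]]
        refine List.pairwise_cons.mpr ⟨?_, ih hcs (by simp at hnm; tauto)⟩
        intro q hq
        rcases (mem_pvIns p q cs).mp hq with rfl | hq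
        · exact hcp
        · exact hc q hq

-- a hinge strictly below every segment start is a no-op for the split pass
theorem pvSplit_low (N p : Int) : ∀ (C : List Int) (start : Int), C.Pairwise (· < ·) → p < start → (∀ c ∈ C, start ≤ c) →
    pvSplit p (pvSegsFrom N start C) = pvSegsFrom N start C := by
  intro C
  induction C with
  | nil => intro start _ hlt _; simp [pvSegsFrom, pvSplit]; omega
  | cons c cs ih =>
      intro start hpw hlt hlo
      rcases List.pairwise_cons.mp hpw with ⟨hcrest, hcs⟩
      have hc : start ≤ c := hlo c (by simp)
      simp only [pvSegsFrom, pvSplit, List.flatMap_cons]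
      rw [show (if start ≤ p ∧ p < c then [(start, p), (p + 1, c)] else [(start, c)]) = [(start, c)] by
        simp; omega]
      have := ih (c + 1) hcs (by omega) (fun q hq => by have := hcrest q hq; omega)
      simp only [pvSplit] at this
      rw [this]
      simp

-- splitting at an existing cut, or at N-1, changes nothing
theorem pvSplit_noop (N p : Int) : ∀ (C : List Int) (start : Int), C.Pairwise (· < ·) →
    (∀ c ∈ C, start ≤ c ∧ c ≤ N - 2) → (p ∈ C ∨ p = N - 1) →
    pvSplit p (pvSegsFrom N start C) = pvSegsFrom N start C := by
  intro C
  induction C with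
  | nil =>
      intro start _ _ hp
      simp only [List.not_mem_nil, false_or] at hp
      subst hp
      simp [pvSegsFrom, pvSplit]
  | cons c cs ih =>
      intro start hpw hb hp
      rcases List.pairwise_cons.mp hpw with ⟨hc, hcs⟩
      have hcb := hb c (by simp)
      simp only [pvSegsFrom, pvSplit, List.flatMap_cons]
      by_cases hpc : p = c
      · subst hpc
        rw [show (if start ≤ p ∧ p < p then [(start, p), (p + 1, p)] else [(start, p)]) = [(start, p)] by simp]
        have := pvSplit_low N p cs (p + 1) hcs (by omega) (fun q hq => by have := hc q hq; omega)
        simp only [pvSplit] at this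
        rw [this]
        simp
      · have hgt : c < p := by
          rcases hp with hp | hp
          · rcases List.mem_cons.mp hp with rfl | hp
            · exact absurd rfl hpc
            · exact hc p hp
          · omega
        rw [show (if start ≤ p ∧ p < c then [(start, p), (p + 1, c)] else [(start, c)]) = [(start, c)] by
          simp; omega]
        have := ih (c + 1) hcs (fun q hq => ⟨by have := hc q hq; omega, (hb q (by simp [hq])).2⟩)
          (by rcases hp with hp | hp
              · rcases List.mem_cons.mp hp with rfl | hp
                · exact absurd rfl hpc
                · exact Or.inl hp
              · exact Or.inr hp)
        simp only [pvSplit] at this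
        rw [this]
        simp

-- splitting at a fresh valid hinge inserts it as a cut
theorem pvSplit_ins (N p : Int) : ∀ (C : List Int) (start : Int), C.Pairwise (· < ·) →
    (∀ c ∈ C, start ≤ c ∧ c ≤ N - 2) → start ≤ p → p ≤ N - 2 → p ∉ C →
    pvSplit p (pvSegsFrom N start C) = pvSegsFrom N start (pvIns p C) := by
  intro C
  induction C with
  | nil =>
      intro start _ _ h1 h2 _
      simp [pvSegsFrom, pvSplit, pvIns]
      omega
  | cons c cs ih =>
      intro start hpw hb h1 h2 hnm
      rcases List.pairwise_cons.mp hpw with ⟨hc, hcs⟩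
      have hcb := hb c (by simp)
      have hpc : p ≠ c := by simp at hnm; tauto
      simp only [pvSegsFrom, pvSplit, List.flatMap_cons]
      by_cases hlt : p < c
      · rw [show (if start ≤ p ∧ p < c then [(start, p), (p + 1, c)] else [(start, c)]) = [(start, p), (p + 1, c)] by
          simp; omega]
        have := pvSplit_low N p cs (c + 1) hcs (by omega) (fun q hq => by have := hc q hq; omega)
        simp only [pvSplit] at this
        rw [this]
        simp [pvIns, le_of_lt hlt, pvSegsFrom]
      · have hgt : c < p := by omega
        rw [show (if start ≤ p ∧ p < c then [(start, p), (p + 1, c)] else [(start, c)]) = [(start, c)] by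
          simp; omega]
        have := ih (c + 1) hcs (fun q hq => ⟨by have := hc q hq; omega, (hb q (by simp [hq])).2⟩)
          (by omega) h2 (by simp at hnm; tauto)
        simp only [pvSplit] at this
        rw [this]
        simp [pvIns, show ¬ p ≤ c by omega, pvSegsFrom]

-- B's inner loop in flatMap form
theorem innerB_eq_pvSplit (p : Int) (segs : List (Int × Int)) :
    segs.foldl (fun out se =>
        out ++ (if se.1 ≤ p ∧ p < se.2 then [(se.1, p), (p + 1, se.2)] else [se])) []
      = pvSplit p segs := by
  have gen : ∀ (xs : List (Int × Int)) (init : List (Int × Int)),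
      xs.foldl (fun out se =>
        out ++ (if se.1 ≤ p ∧ p < se.2 then [(se.1, p), (p + 1, se.2)] else [se])) init
        = init ++ xs.flatMap (fun se => if se.1 ≤ p ∧ p < se.2 then [(se.1, p), (p + 1, se.2)] else [se]) := by
    intro xs
    induction xs with
    | nil => intro init; simp
    | cons se rest ih =>
        intro init
        rw [List.foldl_cons, ih, List.flatMap_cons, List.append_assoc]
  rw [gen, pvSplit, List.nil_append]

theorem mem_pvInsAll (N x : Int) : ∀ (hs C : List Int),
    (x ∈ pvInsAll N C hs ↔ x ∈ C ∨ (x ∈ hs ∧ 0 ≤ x ∧ x ≤ N - 2)) := by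
  intro hs
  induction hs with
  | nil => intro C; simp [pvInsAll]
  | cons p rest ih =>
      intro C
      simp only [pvInsAll, List.foldl_cons]
      by_cases h : 0 ≤ p ∧ p ≤ N - 2 ∧ p ∉ C
      · rw [if_pos h]
        have := ih (pvIns p C)
        simp only [pvInsAll] at this
        rw [this, mem_pvIns]
        constructor
        · rintro ((rfl | hx) | hx)
          · exact Or.inr ⟨by simp, h.1, h.2.1⟩
          · exact Or.inl hx
          · exact Or.inr ⟨by simp [hx.1], hx.2⟩
        · rintro (hx | ⟨hx, hx2⟩)
          · exact Or.inl (Or.inr hx)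
          · rcases List.mem_cons.mp hx with rfl | hx
            · exact Or.inl (Or.inl rfl)
            · exact Or.inr ⟨hx, hx2⟩
      · rw [if_neg h]
        have := ih C
        simp only [pvInsAll] at this
        rw [this]
        constructor
        · rintro (hx | ⟨hx, hx2⟩)
          · exact Or.inl hx
          · exact Or.inr ⟨by simp [hx], hx2⟩
        · rintro (hx | ⟨hx, hx2⟩)
          · exact Or.inl hx
          · rcases List.mem_cons.mp hx with rfl | hx
            · by_cases hxc : x ∈ C
              · exact Or.inl hxc
              · exact absurd ⟨hx2.1, hx2.2, hxc⟩ h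
            · exact Or.inr ⟨hx, hx2⟩

theorem pairwise_pvInsAll (N : Int) : ∀ (hs C : List Int), C.Pairwise (· < ·) →
    (pvInsAll N C hs).Pairwise (· < ·) := by
  intro hs
  induction hs with
  | nil => intro C h; simpa [pvInsAll] using h
  | cons p rest ih =>
      intro C h
      simp only [pvInsAll, List.foldl_cons]
      by_cases hc : 0 ≤ p ∧ p ≤ N - 2 ∧ p ∉ C
      · rw [if_pos hc]
        exact ih _ (pairwise_pvIns p C h hc.2.2)
      · rw [if_neg hc]
        exact ih _ h

-- B's outer fold computes the canonical segmentation of its accumulated cut list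
theorem foldB_eq (N : Int) : ∀ (hs C : List Int), C.Pairwise (· < ·) →
    (∀ c ∈ C, 0 ≤ c ∧ c ≤ N - 2) →
    hs.foldl (fun segs p =>
        if 0 ≤ p ∧ p < N then
          segs.foldl (fun out se =>
            out ++ (if se.1 ≤ p ∧ p < se.2 then [(se.1, p), (p + 1, se.2)] else [se])) []
        else segs) (pvSegsFrom N 0 C)
      = pvSegsFrom N 0 (pvInsAll N C hs) := by
  intro hs
  induction hs with
  | nil => intro C _ _; simp [pvInsAll]
  | cons p rest ih =>
      intro C hpw hb
      simp only [List.foldl_cons, pvInsAll]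
      by_cases hv : 0 ≤ p ∧ p < N
      · rw [if_pos hv, innerB_eq_pvSplit]
        by_cases hmem : p ∈ C
        · rw [pvSplit_noop N p C 0 hpw (fun c hc => ⟨(hb c hc).1, (hb c hc).2⟩) (Or.inl hmem)]
          rw [if_neg (by tauto)]
          exact ih C hpw hb
        · by_cases hsm : p ≤ N - 2
          · rw [pvSplit_ins N p C 0 hpw (fun c hc => ⟨(hb c hc).1, (hb c hc).2⟩) hv.1 hsm hmem]
            rw [if_pos ⟨hv.1, hsm, hmem⟩]
            exact ih (pvIns p C) (pairwise_pvIns p C hpw hmem)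
              (fun c hc => by rcases (mem_pvIns p c C).mp hc with rfl | hc
                              · exact ⟨hv.1, hsm⟩
                              · exact hb c hc)
          · have : p = N - 1 := by omega
            rw [pvSplit_noop N p C 0 hpw (fun c hc => ⟨(hb c hc).1, (hb c hc).2⟩) (Or.inr this)]
            rw [if_neg (by omega)]
            exact ih C hpw hb
      · rw [if_neg hv, if_neg (by omega)]
        exact ih C hpw hb

-- A's cursor loop plus tail append is the canonical segmentation of its cuts below N-1
theorem loopA_eq (N : Int) : ∀ (pos : List Int) (acc : List (Int × Int)) (start : Int),
    pos.Pairwise (· < ·) → (∀ q ∈ pos, start ≤ q ∧ q ≤ N - 1) → start ≤ N - 1 →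
    (let st := pos.foldl (fun (acc : List (Int × Int) × Int) p =>
        (if acc.2 ≤ p then acc.1 ++ [(acc.2, p)] else acc.1, p + 1)) (acc, start)
     if st.2 ≤ N - 1 then st.1 ++ [(st.2, N - 1)] else st.1)
      = acc ++ pvSegsFrom N start (pos.filter (fun p => decide (p < N - 1))) := by
  intro pos
  induction pos with
  | nil =>
      intro acc start _ _ hs
      simp [pvSegsFrom, hs]
  | cons p rest ih =>
      intro acc start hpw hb hs
      rcases List.pairwise_cons.mp hpw with ⟨hc, hcs⟩
      have hpb := hb p (by simp)
      simp only [List.foldl_cons, if_pos hpb.1]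
      by_cases hlt : p < N - 1
      · have := ih (acc ++ [(start, p)]) (p + 1) hcs
          (fun q hq => ⟨by have := hc q hq; omega, (hb q (by simp [hq])).2⟩) (by omega)
        simp only at this ⊢
        rw [this]
        simp [hlt, pvSegsFrom]
      · have hpN : p = N - 1 := by omega
        have hrest : rest = [] := by
          rcases rest with _ | ⟨q, rest'⟩
          · rfl
          · exfalso
            have h1 := hc q (by simp)
            have h2 := (hb q (by simp)).2
            omega
        subst hrest
        simp [pvSegsFrom, hpN]

-- two strictly increasing lists with the same members are equal
theorem eq_of_pairwise_lt_mem (l₁ l₂ : List Int) (h₁ : l₁.Pairwise (· < ·))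
    (h₂ : l₂.Pairwise (· < ·)) (hm : ∀ x, x ∈ l₁ ↔ x ∈ l₂) : l₁ = l₂ := by
  have n₁ : l₁.Nodup := h₁.imp (fun h => ne_of_lt h)
  have n₂ : l₂.Nodup := h₂.imp (fun h => ne_of_lt h)
  exact ((List.perm_ext_iff_of_nodup n₁ n₂).mpr hm).eq_of_pairwise
    (fun a b ha hb h1 h2 => le_antisymm h1 h2) (h₁.imp le_of_lt) (h₂.imp le_of_lt)

theorem build_segments_from_hinges_eq (N : Int) (hinges_pos : List Int) :
    build_segments_from_hinges N hinges_pos = build_segments_from_hinges_alt N hinges_pos := by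
  unfold build_segments_from_hinges build_segments_from_hinges_alt
  by_cases hN : N ≤ 0
  · simp [hN]
  · simp only [hN, if_false]
    set pos := PySem.List.sorted (PySem.Set.ofList (hinges_pos.filter (fun p => decide (0 ≤ p) && decide (p < N)))) (fun x => x) false with hpos
    have hpw : pos.Pairwise (· < ·) := PySem.List.sorted_ofList_pairwise_lt _
    have hmem : ∀ x, x ∈ pos ↔ (x ∈ hinges_pos ∧ 0 ≤ x ∧ x < N) := by
      intro x
      rw [hpos, PySem.List.mem_sorted, PySem.Set.mem_ofList, List.mem_filter]
      simp
    have hb : ∀ q ∈ pos, (0 : Int) ≤ q ∧ q ≤ N - 1 := by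
      intro q hq
      have := (hmem q).mp hq
      omega
    have keyA := loopA_eq N pos [] 0 hpw hb (by omega)
    simp only [List.nil_append] at keyA
    rw [keyA, if_neg (pvSegsFrom_ne_nil N 0 _)]
    rw [show ([((0 : Int), N - 1)] : List (Int × Int)) = pvSegsFrom N 0 [] by simp [pvSegsFrom]]
    rw [foldB_eq N hinges_pos [] (by simp) (by simp)]
    congr 1
    apply eq_of_pairwise_lt_mem
    · exact hpw.filter _
    · exact pairwise_pvInsAll N hinges_pos [] (by simp)
    · intro x
      rw [List.mem_filter, hmem x, mem_pvInsAll]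
      simp only [List.not_mem_nil, false_or, decide_eq_true_eq]
      constructor
      · rintro ⟨⟨h1, h2, h3⟩, h4⟩
        exact ⟨h1, h2, by omega⟩
      · rintro ⟨h1, h2, h3⟩
        exact ⟨⟨h1, h2, by omega⟩, by omega⟩

-- ===== VERDICT (by name: the statement is the Claim_ definition above) =====
theorem build_segments_from_hinges_spec : Claim_equal_build_segments_from_hinges := by
  intro N hinges_pos _
  unfold Spec_build_segments_from_hinges
  exact build_segments_from_hinges_eq N hinges_pos
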